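-- pv_equiv track=rewrite | github.com/sproutsai-engg/coding_question_generator | json_files/python_codes/Q_1487.py | maxNumberOfFamilies
-- ===== SOURCE A (Python) =====
-- def maxNumberOfFamilies(n, reservedSeats):
--     rows = {}
--     for seat in reservedSeats:
--         rows[seat[0]] = rows.get(seat[0], 0) | (1 << (seat[1] - 1))
--
--     max_groups = (n - len(rows)) * 2
--     for row_mask in rows.values():
--         seats = ~(row_mask | (row_mask >> 1) | (row_mask >> 2) | (row_mask >> 3)) & 0x3FF
--         max_groups += (seats & (seats >> 1) & (seats >> 2) & (seats >> 3)) != 0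
--
--     return max_groups
-- ===== SOURCE B (Python) =====
-- def maxNumberOfFamilies(n, reservedSeats):
--     rows = {}
--     for seat in reservedSeats:
--         rows.setdefault(seat[0], set()).add(seat[1])
--     groups = (n - len(rows)) * 2
--     for cols in rows.values():
--         if any(all(start + k not in cols for k in range(7)) for start in range(1, 8)):
--             groups += 1
--     return groups
-- ===== Notes on version B (the rewrite author's own statement) =====
-- stated objective: simpler
-- what changed: Replaces A's per-row bit-mask OR/shift/complement arithmetic by a dict of per-row reserved-column sets tested with a plain any/all 7-seat sliding window over columns 1..13, reproducing A's exact 7-consecutive-free criterion.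
import Mathlib
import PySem

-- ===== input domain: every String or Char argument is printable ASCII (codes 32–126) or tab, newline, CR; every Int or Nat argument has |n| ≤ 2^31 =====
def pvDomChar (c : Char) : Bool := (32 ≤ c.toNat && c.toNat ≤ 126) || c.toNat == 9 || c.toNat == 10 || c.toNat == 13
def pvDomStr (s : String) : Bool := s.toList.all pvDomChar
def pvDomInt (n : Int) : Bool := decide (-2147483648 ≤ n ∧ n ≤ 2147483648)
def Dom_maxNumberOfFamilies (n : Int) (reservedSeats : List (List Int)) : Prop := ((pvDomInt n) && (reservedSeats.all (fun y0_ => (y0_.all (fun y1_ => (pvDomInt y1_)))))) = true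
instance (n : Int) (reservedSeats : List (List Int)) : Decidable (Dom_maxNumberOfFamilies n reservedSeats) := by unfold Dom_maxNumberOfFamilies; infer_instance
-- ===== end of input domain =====

-- B replaces A's bit-mask arithmetic by a dict of per-row reserved-column sets checked
-- with a plain 7-seat sliding window (objective: simpler; same asymptotic cost).

-- ===== PORT A =====
def maxNumberOfFamilies (n : Int) (reservedSeats : List (List Int)) : Int :=
  let rows : PySem.Dict Int Int :=
    reservedSeats.foldl (fun d seat =>
      d.insert (PySem.List.pyGetD seat 0 0)
        (PySem.Int.bor (d.getD (PySem.List.pyGetD seat 0 0) 0)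
          ((1 : Int) <<< ((PySem.List.pyGetD seat 1 0) - 1).toNat))) PySem.Dict.empty
  let base : Int := (n - (rows.size : Int)) * 2
  rows.values.foldl (fun acc m =>
    let seats : Int := PySem.Int.band
      (Int.not (PySem.Int.bor (PySem.Int.bor (PySem.Int.bor m (m >>> 1)) (m >>> 2)) (m >>> 3))) 0x3FF
    acc + (if PySem.Int.band (PySem.Int.band (PySem.Int.band seats (seats >>> 1)) (seats >>> 2)) (seats >>> 3) ≠ 0
           then 1 else 0)) base

-- ===== PORT B =====
def maxNumberOfFamilies_alt (n : Int) (reservedSeats : List (List Int)) : Int :=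
  let rows : PySem.Dict Int (PySem.Set Int) :=
    reservedSeats.foldl (fun d seat =>
      d.insert (PySem.List.pyGetD seat 0 0)
        (PySem.Set.add (d.getD (PySem.List.pyGetD seat 0 0) PySem.Set.empty)
          (PySem.List.pyGetD seat 1 0))) PySem.Dict.empty
  let base : Int := (n - (rows.size : Int)) * 2
  rows.values.foldl (fun acc cols =>
    acc + (if (PySem.List.pyRange 1 8 1).any (fun start =>
                (PySem.List.pyRange 0 7 1).all (fun k => !(PySem.Set.contains cols (start + k))))
           then 1 else 0)) base

-- ===== PRECONDITION & SPEC =====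
-- Pre_ excludes inputs where A raises: a seat list with fewer than 2 entries (IndexError) or a
-- column seat[1] < 1 (ValueError: negative shift count in 1 << (seat[1]-1)).
def Pre_maxNumberOfFamilies (n : Int) (reservedSeats : List (List Int)) : Prop :=
  ∀ seat ∈ reservedSeats, 2 ≤ seat.length ∧ 1 ≤ seat.getD 1 0
instance (n : Int) (reservedSeats : List (List Int)) : Decidable (Pre_maxNumberOfFamilies n reservedSeats) := by unfold Pre_maxNumberOfFamilies; infer_instance

def pvWitness_maxNumberOfFamilies : Int × List (List Int) := (3, [[1, 2], [1, 9], [2, 4]])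

def Spec_maxNumberOfFamilies (n : Int) (reservedSeats : List (List Int)) (out : Int) : Prop := out = maxNumberOfFamilies_alt n reservedSeats
instance (n : Int) (reservedSeats : List (List Int)) (out : Int) : Decidable (Spec_maxNumberOfFamilies n reservedSeats out) := by unfold Spec_maxNumberOfFamilies; infer_instance

-- ===== CLAIM (what is proved, stated in full; the proofs are below) =====
def Claim_equal_maxNumberOfFamilies : Prop := ∀ (n : Int) (reservedSeats : List (List Int)), Dom_maxNumberOfFamilies n reservedSeats → Pre_maxNumberOfFamilies n reservedSeats → Spec_maxNumberOfFamilies n reservedSeats (maxNumberOfFamilies n reservedSeats)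
-- ===== LEMMAS AND PROOFS =====

-- the mask/set relation maintained between the two row dictionaries
def pvRel (m : Int) (s : PySem.Set Int) : Prop :=
  0 ≤ m ∧ ∀ j : Nat, (m.toNat.testBit j = true ↔ ((j : Int) + 1) ∈ s)

-- A's per-row bit computation, restated at the Nat level
def pvY (t : Nat) : Nat := t ||| t >>> 1 ||| t >>> 2 ||| t >>> 3
def pvS (t : Nat) : Nat := 1023 - (1023 &&& pvY t)
def pvF (t : Nat) : Nat := pvS t &&& pvS t >>> 1 &&& pvS t >>> 2 &&& pvS t >>> 3

set_option maxRecDepth 100000 in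
lemma pvSub_eq_xor : ∀ x < 1024, 1023 - x = 1023 ^^^ x := by decide

lemma pvYbit (t a : Nat) : (pvY t).testBit a =
    (t.testBit a || t.testBit (a + 1) || t.testBit (a + 2) || t.testBit (a + 3)) := by
  simp [pvY, Nat.testBit_or, Nat.testBit_shiftRight, Nat.add_comm]

lemma pv1023bit (a : Nat) : (1023 : Nat).testBit a = decide (a < 10) := by
  have h : (1023 : Nat) = 2 ^ 10 - 1 := by norm_num
  rw [h, Nat.testBit_two_pow_sub_one]

lemma pvSbit (t a : Nat) : (pvS t).testBit a = true ↔ a < 10 ∧ ∀ i, i ≤ 3 → t.testBit (a + i) = false := by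
  rw [pvS, pvSub_eq_xor _ (by have := Nat.and_le_left (n := 1023) (m := pvY t); omega)]
  rw [Nat.testBit_xor, Nat.testBit_and, pv1023bit, pvYbit]
  constructor
  · intro h
    by_cases h10 : a < 10
    · simp only [h10, decide_true] at h
      refine ⟨h10, ?_⟩
      intro i hi
      interval_cases i <;> simp_all
    · simp [h10] at h
  · rintro ⟨h10, hb⟩
    have h0 := hb 0 (by omega); have h1 := hb 1 (by omega)
    have h2 := hb 2 (by omega); have h3 := hb 3 (by omega)
    simp_all

lemma pvFbit (t j : Nat) : (pvF t).testBit j = true ↔ j ≤ 6 ∧ ∀ i, i ≤ 6 → t.testBit (j + i) = false := by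
  rw [pvF]
  simp only [Nat.testBit_and, Nat.testBit_shiftRight, Bool.and_eq_true]
  rw [pvSbit, pvSbit, pvSbit, pvSbit]
  constructor
  · rintro ⟨⟨⟨⟨_, w0⟩, ⟨_, w1⟩⟩, ⟨_, w2⟩⟩, ⟨h310, w3⟩⟩
    refine ⟨by omega, ?_⟩
    intro i hi
    rcases Nat.lt_or_ge i 4 with h4 | h4
    · exact w0 i (by omega)
    · have h := w3 (i - 3) (by omega)
      rwa [show 3 + j + (i - 3) = j + i from by omega] at h
  · rintro ⟨hj, hb⟩
    refine ⟨⟨⟨⟨by omega, ?_⟩, ⟨by omega, ?_⟩⟩, ⟨by omega, ?_⟩⟩, ⟨by omega, ?_⟩⟩ <;>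
      intro i hi
    · exact hb i (by omega)
    · have h := hb (1 + i) (by omega); rwa [show j + (1 + i) = 1 + j + i from by omega] at h
    · have h := hb (2 + i) (by omega); rwa [show j + (2 + i) = 2 + j + i from by omega] at h
    · have h := hb (3 + i) (by omega); rwa [show j + (3 + i) = 3 + j + i from by omega] at h

lemma pvF_ne_zero (t : Nat) : pvF t ≠ 0 ↔ ∃ j : Nat, j ≤ 6 ∧ ∀ i, i ≤ 6 → t.testBit (j + i) = false := by
  constructor
  · intro h
    obtain ⟨j, hj⟩ := Nat.exists_testBit_of_ne_zero h
    exact ⟨j, (pvFbit t j).mp hj⟩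
  · rintro ⟨j, hj⟩ h0
    have h := (pvFbit t j).mpr hj
    rw [h0, Nat.zero_testBit] at h
    exact Bool.false_ne_true h

-- ~Y & 0x3FF for a nonnegative Y, pushed to Nat
lemma pvBandNot (Y : Nat) : PySem.Int.band (Int.not (Y : Int)) 0x3FF = ((1023 - (1023 &&& Y) : Nat) : Int) := by
  simp [PySem.Int.band, Int.not]

lemma pvShift1 (t : Nat) : ((t : Int) >>> (1 : Int)) = ((t >>> 1 : Nat) : Int) := rfl
lemma pvShift2 (t : Nat) : ((t : Int) >>> (2 : Int)) = ((t >>> 2 : Nat) : Int) := rfl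
lemma pvShift3 (t : Nat) : ((t : Int) >>> (3 : Int)) = ((t >>> 3 : Nat) : Int) := rfl

-- A's per-row Int expression is ↑(pvF m.toNat)
lemma pvA_crit (m : Int) (hm : 0 ≤ m) :
    PySem.Int.band (PySem.Int.band (PySem.Int.band
      (PySem.Int.band (Int.not (PySem.Int.bor (PySem.Int.bor (PySem.Int.bor m (m >>> (1:Int))) (m >>> (2:Int))) (m >>> (3:Int)))) 0x3FF)
      ((PySem.Int.band (Int.not (PySem.Int.bor (PySem.Int.bor (PySem.Int.bor m (m >>> (1:Int))) (m >>> (2:Int))) (m >>> (3:Int)))) 0x3FF) >>> (1:Int)))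
      ((PySem.Int.band (Int.not (PySem.Int.bor (PySem.Int.bor (PySem.Int.bor m (m >>> (1:Int))) (m >>> (2:Int))) (m >>> (3:Int)))) 0x3FF) >>> (2:Int)))
      ((PySem.Int.band (Int.not (PySem.Int.bor (PySem.Int.bor (PySem.Int.bor m (m >>> (1:Int))) (m >>> (2:Int))) (m >>> (3:Int)))) 0x3FF) >>> (3:Int))
    = ((pvF m.toNat : Nat) : Int) := by
  obtain ⟨t, rfl⟩ : ∃ t : Nat, m = (t : Int) := ⟨m.toNat, (Int.toNat_of_nonneg hm).symm⟩
  simp only [pvShift1, pvShift2, pvShift3, PySem.Int.bor_natCast, pvBandNot,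
    PySem.Int.band_natCast, Int.toNat_natCast]
  rfl

-- B's per-row window test, characterised
lemma pvB_crit (s : PySem.Set Int) :
    ((PySem.List.pyRange 1 8 1).any (fun start =>
      (PySem.List.pyRange 0 7 1).all (fun k => !(PySem.Set.contains s (start + k))))) = true
    ↔ ∃ j : Nat, j ≤ 6 ∧ ∀ i : Nat, i ≤ 6 → ((j : Int) + (i : Int) + 1) ∉ s := by
  simp only [List.any_eq_true, List.all_eq_true, PySem.List.mem_pyRange_one,
    Bool.not_eq_eq_eq_not, Bool.not_true]
  constructor
  · rintro ⟨start, ⟨h1, h8⟩, hall⟩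
    refine ⟨(start - 1).toNat, by omega, ?_⟩
    intro i hi
    have hk := hall (i : Int) ⟨by omega, by omega⟩
    simp only [PySem.Set.contains] at hk ⊢
    rw [show ((start - 1).toNat : Int) + (i : Int) + 1 = start + i from by omega]
    simp_all
  · rintro ⟨j, hj, hb⟩
    refine ⟨(j : Int) + 1, ⟨by omega, by omega⟩, ?_⟩
    intro k ⟨hk0, hk7⟩
    have hmem := hb k.toNat (by omega)
    rw [show ((k.toNat : Int)) = k from by omega] at hmem
    simp only [PySem.Set.contains]
    have hmem' : ((j : Int) + 1 + k) ∉ s := by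
      rw [show (j : Int) + 1 + k = (j : Int) + k + 1 from by ring]; exact hmem
    simp_all

lemma pvRel_step (m : Int) (s : PySem.Set Int) (c : Int) (hc : 1 ≤ c) (h : pvRel m s) :
    pvRel (PySem.Int.bor m ((1 : Int) <<< (c - 1).toNat)) (PySem.Set.add s c) := by
  obtain ⟨hm, hbit⟩ := h
  obtain ⟨t, rfl⟩ : ∃ t : Nat, m = (t : Int) := ⟨m.toNat, (Int.toNat_of_nonneg hm).symm⟩
  have hsh : ((1 : Int) <<< (c - 1).toNat) = (((1 <<< (c - 1).toNat : Nat)) : Int) := rfl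
  rw [hsh, PySem.Int.bor_natCast]
  refine ⟨by positivity, ?_⟩
  intro j
  rw [Int.toNat_natCast, Nat.testBit_or, PySem.Set.mem_add]
  rw [Nat.testBit_shiftLeft]
  have h1 : Nat.testBit 1 (j - (c - 1).toNat) = decide (j - (c - 1).toNat = 0) := by
    rcases hh : j - (c - 1).toNat with _ | nn <;> simp [Nat.testBit_succ]
  rw [h1]
  rw [Int.toNat_natCast] at hbit
  constructor
  · intro hh
    rcases Bool.or_eq_true_iff.mp hh with hl | hr
    · exact Or.inl ((hbit j).mp hl)
    · right
      simp only [Bool.and_eq_true, decide_eq_true_eq] at hr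
      omega
  · rintro (hl | hr)
    · simp [(hbit j).mpr hl]
    · have hj : j = (c - 1).toNat := by omega
      subst hj
      simp

lemma pvBuild_rel : ∀ (l : List (List Int))
    (dA : PySem.Dict Int Int) (dB : PySem.Dict Int (PySem.Set Int)),
    (∀ seat ∈ l, 2 ≤ seat.length ∧ 1 ≤ seat.getD 1 0) →
    (∀ k, pvRel (dA.getD k 0) (dB.getD k PySem.Set.empty)) →
    ∀ k, pvRel
      ((l.foldl (fun d seat =>
        d.insert (PySem.List.pyGetD seat 0 0)
          (PySem.Int.bor (d.getD (PySem.List.pyGetD seat 0 0) 0)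
            ((1 : Int) <<< ((PySem.List.pyGetD seat 1 0) - 1).toNat))) dA).getD k 0)
      ((l.foldl (fun d seat =>
        d.insert (PySem.List.pyGetD seat 0 0)
          (PySem.Set.add (d.getD (PySem.List.pyGetD seat 0 0) PySem.Set.empty)
            (PySem.List.pyGetD seat 1 0))) dB).getD k PySem.Set.empty) := by
  intro l
  induction l with
  | nil => intro dA dB _ hrel k; simpa using hrel k
  | cons seat rest ih =>
    intro dA dB hpre hrel k
    simp only [List.foldl_cons]
    apply ih _ _ (fun s hs => hpre s (List.mem_cons_of_mem _ hs))
    intro k'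
    by_cases hk : k' = PySem.List.pyGetD seat 0 0
    · subst hk
      rw [PySem.Dict.getD_insert_self, PySem.Dict.getD_insert_self]
      have hc : 1 ≤ PySem.List.pyGetD seat 1 0 := by
        have h := hpre seat (List.mem_cons_self)
        have hg : PySem.List.pyGetD seat 1 0 = seat.getD 1 0 := by simp [pysem]
        omega
      exact pvRel_step _ _ _ hc (hrel _)
    · rw [PySem.Dict.getD_insert_of_ne _ _ _ hk, PySem.Dict.getD_insert_of_ne _ _ _ hk]
      exact hrel k'

-- per-row contributions agree under pvRel
lemma pvContrib_eq (m : Int) (s : PySem.Set Int) (h : pvRel m s) :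
    (if PySem.Int.band (PySem.Int.band (PySem.Int.band
        (PySem.Int.band (Int.not (PySem.Int.bor (PySem.Int.bor (PySem.Int.bor m (m >>> (1:Int))) (m >>> (2:Int))) (m >>> (3:Int)))) 0x3FF)
        ((PySem.Int.band (Int.not (PySem.Int.bor (PySem.Int.bor (PySem.Int.bor m (m >>> (1:Int))) (m >>> (2:Int))) (m >>> (3:Int)))) 0x3FF) >>> (1:Int)))
        ((PySem.Int.band (Int.not (PySem.Int.bor (PySem.Int.bor (PySem.Int.bor m (m >>> (1:Int))) (m >>> (2:Int))) (m >>> (3:Int)))) 0x3FF) >>> (2:Int)))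
        ((PySem.Int.band (Int.not (PySem.Int.bor (PySem.Int.bor (PySem.Int.bor m (m >>> (1:Int))) (m >>> (2:Int))) (m >>> (3:Int)))) 0x3FF) >>> (3:Int)) ≠ 0
     then (1 : Int) else 0)
    = (if (PySem.List.pyRange 1 8 1).any (fun start =>
            (PySem.List.pyRange 0 7 1).all (fun k => !(PySem.Set.contains s (start + k)))) = true
       then (1 : Int) else 0) := by
  rw [pvA_crit m h.1]
  have hiff : ((pvF m.toNat : Nat) : Int) ≠ 0 ↔
      ((PySem.List.pyRange 1 8 1).any (fun start =>
        (PySem.List.pyRange 0 7 1).all (fun k => !(PySem.Set.contains s (start + k))))) = true := by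
    rw [pvB_crit s]
    rw [show (((pvF m.toNat : Nat) : Int) ≠ 0) ↔ pvF m.toNat ≠ 0 from by exact_mod_cast Iff.rfl]
    rw [pvF_ne_zero]
    constructor <;> rintro ⟨j, hj, hb⟩ <;> refine ⟨j, hj, ?_⟩ <;> intro i hi
    · have h2 := (h.2 (j + i)).not
      have hbit := hb i hi
      rw [show (((j + i : Nat) : Int) + 1) = (j : Int) + (i : Int) + 1 from by push_cast; ring] at h2
      simp only [hbit] at h2
      exact h2.mp (by simp)
    · have h2 := (h.2 (j + i))
      have hbit := hb i hi
      rw [show (((j + i : Nat) : Int) + 1) = (j : Int) + (i : Int) + 1 from by push_cast; ring] at h2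
      rw [← Bool.not_eq_true]
      intro hcon
      exact hbit (h2.mp hcon)
  split_ifs with ha hb hc
  · rfl
  · exact absurd (hiff.mp ha) hb
  · exact absurd (hiff.mpr hc) ha
  · rfl

-- ===== VERDICT (by name: the statement is the Claim_ definition above) =====
theorem maxNumberOfFamilies_spec : Claim_equal_maxNumberOfFamilies := by
  intro n rs _ hpre
  unfold Spec_maxNumberOfFamilies maxNumberOfFamilies maxNumberOfFamilies_alt
  simp only []
  have hrel := pvBuild_rel rs PySem.Dict.empty PySem.Dict.empty hpre
    (by intro k
        simp only [pysem, PySem.Dict.getD, PySem.Dict.get?, PySem.Dict.empty]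
        exact ⟨le_refl 0, by simp [Nat.zero_testBit]⟩)
  set dA := rs.foldl (fun d seat =>
      d.insert (PySem.List.pyGetD seat 0 0)
        (PySem.Int.bor (d.getD (PySem.List.pyGetD seat 0 0) 0)
          ((1 : Int) <<< ((PySem.List.pyGetD seat 1 0) - 1).toNat))) PySem.Dict.empty with hdA
  set dB := rs.foldl (fun d seat =>
      d.insert (PySem.List.pyGetD seat 0 0)
        (PySem.Set.add (d.getD (PySem.List.pyGetD seat 0 0) PySem.Set.empty)
          (PySem.List.pyGetD seat 1 0))) PySem.Dict.empty with hdB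
  have hkeysA := PySem.Dict.keys_foldl_insert_key (ν := Int) rs (fun seat => PySem.List.pyGetD seat 0 0)
      (fun d seat => PySem.Int.bor (d.getD (PySem.List.pyGetD seat 0 0) 0)
        ((1 : Int) <<< ((PySem.List.pyGetD seat 1 0) - 1).toNat)) PySem.Dict.empty
  have hkeysB := PySem.Dict.keys_foldl_insert_key (ν := PySem.Set Int) rs (fun seat => PySem.List.pyGetD seat 0 0)
      (fun d seat => PySem.Set.add (d.getD (PySem.List.pyGetD seat 0 0) PySem.Set.empty)
        (PySem.List.pyGetD seat 1 0)) PySem.Dict.empty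
  have hkeys : dA.keys = dB.keys := by rw [← hdA] at hkeysA; rw [← hdB] at hkeysB; rw [hkeysA, hkeysB]; simp [PySem.Dict.empty, PySem.Dict.keys]
  have hndA : dA.keys.Nodup := by
    rw [hdA]
    exact PySem.Dict.nodup_keys_foldl_insert_key _ _ _ _ (by simp [PySem.Dict.keys, PySem.Dict.empty])
  have hndB : dB.keys.Nodup := hkeys ▸ hndA
  have hvalA := PySem.Dict.values_eq_map_keys dA hndA 0
  have hvalB := PySem.Dict.values_eq_map_keys dB hndB PySem.Set.empty
  have hsize : dA.size = dB.size := by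
    have h1 : dA.size = dA.keys.length := by simp [PySem.Dict.size, PySem.Dict.keys]
    have h2 : dB.size = dB.keys.length := by simp [PySem.Dict.size, PySem.Dict.keys]
    rw [h1, h2, hkeys]
  rw [hvalA, hvalB, ← hkeys, hsize]
  rw [PySem.List.foldl_add, PySem.List.foldl_add]
  congr 1
  rw [List.map_map, List.map_map]
  apply congrArg
  apply List.map_congr_left
  intro k hk
  exact pvContrib_eq _ _ (hrel k)
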